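-- pv_equiv track=rewrite | github.com/Hinoshii/OODS_Grader | Sort/sort3.py | checkKN
-- ===== SOURCE A (Python) =====
-- def checkKN(item,previous=None):
--     flag = [True,False]
--     for i in item:
--         if previous == None:
--             previous = i
--         else:
--             if previous < i:
--                 flag[0] = False
--             if previous == i:
--                 flag[1] = True
--             previous = i
--     return flag
-- ===== SOURCE B (Python) =====
-- def checkKN(item, previous=None):
--     seq = ([previous] if previous is not None else []) + list(item)
--     le, eq = _solve(seq)
--     return [le, eq]
--
-- def _solve(seq):
--     # divide and conquer over the adjacent-pair structure: combine the two
--     # halves' answers with the single boundary pair (seq[mid-1], seq[mid])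
--     n = len(seq)
--     if n <= 1:
--         return (True, False)
--     mid = n // 2
--     lle, leq = _solve(seq[:mid])
--     rle, req = _solve(seq[mid:])
--     a, b = seq[mid - 1], seq[mid]
--     return (lle and rle and a >= b, leq or req or a == b)
-- ===== Notes on version B (the rewrite author's own statement) =====
-- stated objective: alternative
-- what changed: Replaces A's single stateful left-to-right accumulator pass with a divide-and-conquer recursion that splits the effective sequence in half, solves each half, and combines the answers with the one boundary pair.
import Mathlib
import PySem

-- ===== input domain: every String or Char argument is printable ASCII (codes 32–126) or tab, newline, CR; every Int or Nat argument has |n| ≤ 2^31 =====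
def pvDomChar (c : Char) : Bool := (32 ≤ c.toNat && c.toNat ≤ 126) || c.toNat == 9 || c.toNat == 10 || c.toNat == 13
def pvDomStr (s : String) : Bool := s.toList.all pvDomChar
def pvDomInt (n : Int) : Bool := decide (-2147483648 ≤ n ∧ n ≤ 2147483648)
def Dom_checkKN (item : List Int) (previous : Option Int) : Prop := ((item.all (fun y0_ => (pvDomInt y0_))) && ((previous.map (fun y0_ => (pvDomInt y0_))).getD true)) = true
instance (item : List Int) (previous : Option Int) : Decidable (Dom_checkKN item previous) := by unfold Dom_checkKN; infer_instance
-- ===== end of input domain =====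

-- B replaces A's single stateful accumulator pass with a divide-and-conquer recursion
-- over the effective sequence (an alternative decomposition, not claimed faster).

-- ===== PORT A =====
-- state: (flag[0], flag[1], previous)
def checkKNStep (st : Bool × Bool × Option Int) (i : Int) : Bool × Bool × Option Int :=
  match st with
  | (f0, f1, none) => (f0, f1, some i)
  | (f0, f1, some p) =>
      (if p < i then false else f0, if p == i then true else f1, some i)

def checkKN (item : List Int) (previous : Option Int) : List Bool :=
  let r := item.foldl checkKNStep (true, false, previous)
  [r.1, r.2.1]

-- ===== PORT B =====
-- _solve: divide and conquer; the two halves plus the boundary pair (seq[mid-1], seq[mid])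
def solveKN (seq : List Int) : Bool × Bool :=
  if _h : seq.length ≤ 1 then (true, false)
  else
    let mid := seq.length / 2
    let l := solveKN (seq.take mid)
    let r := solveKN (seq.drop mid)
    let a := seq.getD (mid - 1) 0   -- index provably in range (n ≥ 2), exact for Python seq[mid-1]
    let b := seq.getD mid 0         -- index provably in range, exact for Python seq[mid]
    (l.1 && r.1 && decide (b ≤ a), l.2 || r.2 || (a == b))
termination_by seq.length
decreasing_by
  · simp only [List.length_take]; omega
  · simp only [List.length_drop]; omega

def checkKN_alt (item : List Int) (previous : Option Int) : List Bool :=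
  let seq : List Int := (match previous with | some p => [p] | none => []) ++ item
  let r := solveKN seq
  [r.1, r.2]

-- ===== PRECONDITION & SPEC =====
def Spec_checkKN (item : List Int) (previous : Option Int) (out : List Bool) : Prop := out = checkKN_alt item previous
instance (item : List Int) (previous : Option Int) (out : List Bool) : Decidable (Spec_checkKN item previous out) := by unfold Spec_checkKN; infer_instance

-- ===== CLAIM (what is proved, stated in full; the proofs are below) =====
def Claim_equal_checkKN : Prop := ∀ (item : List Int) (previous : Option Int), Dom_checkKN item previous → Spec_checkKN item previous (checkKN item previous)

-- ===== LEMMAS AND PROOFS =====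

-- the adjacent pairs of a list (the common characterisation both ports are reduced to)
def pairsKN : List Int → List (Int × Int)
  | a :: b :: t => (a, b) :: pairsKN (b :: t)
  | _ => []

theorem pairsKN_append : ∀ (L : List Int) (a r0 : Int) (R : List Int),
    pairsKN (L ++ a :: r0 :: R) = pairsKN (L ++ [a]) ++ (a, r0) :: pairsKN (r0 :: R) := by
  intro L
  induction L with
  | nil => intro a r0 R; simp [pairsKN]
  | cons x L' ih =>
      intro a r0 R
      cases L' with
      | nil => simp [pairsKN]
      | cons y L'' =>
          have h := ih a r0 R
          simp only [List.cons_append, pairsKN] at h ⊢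
          rw [h]

theorem solveKN_correct_aux : ∀ (n : Nat) (seq : List Int), seq.length ≤ n →
    solveKN seq = ((pairsKN seq).all (fun ab => decide (ab.2 ≤ ab.1)),
                   (pairsKN seq).any (fun ab => ab.1 == ab.2)) := by
  intro n
  induction n with
  | zero =>
      intro seq hlen
      have : seq = [] := List.eq_nil_of_length_eq_zero (Nat.le_zero.mp hlen)
      subst this
      simp [solveKN, pairsKN]
  | succ n ih =>
      intro seq hlen
      rw [solveKN]
      by_cases h1 : seq.length ≤ 1
      · rw [dif_pos h1]
        match seq, h1 with
        | [], _ => simp [pairsKN]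
        | [a], _ => simp [pairsKN]
      · rw [dif_neg h1]
        dsimp only
        push Not at h1
        set mid := seq.length / 2 with hmid
        obtain ⟨m, hm⟩ : ∃ m, mid = m + 1 := ⟨mid - 1, by omega⟩
        have hmlt : mid < seq.length := by omega
        have hmlt' : m < seq.length := by omega
        have hm1e : mid - 1 = m := by omega
        have ha : seq.getD (mid - 1) 0 = seq[m]'hmlt' := by
          rw [hm1e, List.getD_eq_getElem?_getD, List.getElem?_eq_getElem hmlt']; rfl
        have hb : seq.getD mid 0 = seq[mid]'hmlt := by
          rw [List.getD_eq_getElem?_getD, List.getElem?_eq_getElem hmlt]; rfl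
        have htake : seq.take mid = seq.take m ++ [seq[m]'hmlt'] := by
          rw [hm, List.take_add_one, List.getElem?_eq_getElem hmlt']; rfl
        have hdrop : seq.drop mid = seq[mid]'hmlt :: seq.drop (mid + 1) :=
          List.drop_eq_getElem_cons hmlt
        have hseq : seq = seq.take m ++ (seq[m]'hmlt') :: (seq[mid]'hmlt) :: seq.drop (mid + 1) := by
          conv_lhs => rw [← List.take_append_drop mid seq]
          rw [htake, hdrop]
          simp only [List.append_assoc, List.singleton_append]
        have hpairs : pairsKN seq
            = pairsKN (seq.take mid) ++ (seq[m]'hmlt', seq[mid]'hmlt) :: pairsKN (seq.drop mid) := by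
          conv_lhs => rw [hseq]
          rw [pairsKN_append, ← htake, ← hdrop]
        rw [ih (seq.take mid) (by simp; omega), ih (seq.drop mid) (by simp; omega)]
        simp only [hpairs, ha, hb, List.all_append, List.any_append, List.all_cons, List.any_cons,
          Prod.mk.injEq]
        constructor
        · simp [Bool.and_assoc, Bool.and_comm]
        · simp [Bool.or_assoc, Bool.or_comm]

theorem solveKN_correct (seq : List Int) :
    solveKN seq = ((pairsKN seq).all (fun ab => decide (ab.2 ≤ ab.1)),
                   (pairsKN seq).any (fun ab => ab.1 == ab.2)) :=
  solveKN_correct_aux seq.length seq (Nat.le_refl _)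

theorem checkKN_loop (item : List Int) : ∀ (p : Int) (f0 f1 : Bool),
    (item.foldl checkKNStep (f0, f1, some p)).1
      = (f0 && (pairsKN (p :: item)).all (fun ab => decide (ab.2 ≤ ab.1)))
  ∧ (item.foldl checkKNStep (f0, f1, some p)).2.1
      = (f1 || (pairsKN (p :: item)).any (fun ab => ab.1 == ab.2)) := by
  induction item with
  | nil => intro p f0 f1; simp [pairsKN]
  | cons i rest ih =>
      intro p f0 f1
      have h := ih i (if p < i then false else f0) (if p == i then true else f1)
      constructor
      · simp only [List.foldl, checkKNStep, h.1, pairsKN, List.all_cons]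
        by_cases hpi : p < i
        · simp [hpi, show ¬ (i ≤ p) by omega]
        · simp [hpi, show i ≤ p by omega]
      · simp only [List.foldl, checkKNStep, h.2, pairsKN, List.any_cons]
        by_cases hpi : p = i
        · simp [hpi]
        · simp [beq_eq_false_iff_ne.mpr hpi]

-- ===== VERDICT (by name: the statement is the Claim_ definition above) =====
theorem checkKN_spec : Claim_equal_checkKN := by
  unfold Claim_equal_checkKN
  intro item previous _
  unfold Spec_checkKN checkKN checkKN_alt
  cases previous with
  | some p =>
      have h := checkKN_loop item p true false
      simp only [List.cons_append, List.nil_append, solveKN_correct]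
      rw [h.1, h.2]
      simp
  | none =>
      cases item with
      | nil => simp [solveKN]
      | cons i rest =>
          have h := checkKN_loop rest i true false
          simp only [List.foldl, checkKNStep, List.nil_append, solveKN_correct]
          rw [h.1, h.2]
          simp
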